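-- pv_equiv track=rewrite | github.com/ackyla/saysing | sing.py | vector_to_notes
-- ===== SOURCE A (Python) =====
-- def vector_to_notes(vector):
--     duration = 1
--     notes = []
--     vector.reverse()
--
--     for num in vector:
--         if num != '1000':
--             notes.append([num, duration])
--             duration = 1
--         else:
--             duration += 1
--
--     notes.reverse()
--
--     return notes
-- ===== SOURCE B (Python) =====
-- def vector_to_notes(vector):
--     notes = []
--     for num in vector:
--         if num != '1000':
--             notes.append([num, 1])
--         elif notes:
--             notes[-1][1] += 1
--     return notes
-- ===== Notes on version B (the rewrite author's own statement) =====
-- stated objective: simpler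
-- what changed: B is a single forward pass that appends [num,1] for each note and bumps the last note's duration in place on '1000' markers, replacing A's reverse-the-input, reversed accumulation with a separate duration counter, and final reverse of the output; B also leaves the input list unmutated (A leaves vector reversed).
import Mathlib
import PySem

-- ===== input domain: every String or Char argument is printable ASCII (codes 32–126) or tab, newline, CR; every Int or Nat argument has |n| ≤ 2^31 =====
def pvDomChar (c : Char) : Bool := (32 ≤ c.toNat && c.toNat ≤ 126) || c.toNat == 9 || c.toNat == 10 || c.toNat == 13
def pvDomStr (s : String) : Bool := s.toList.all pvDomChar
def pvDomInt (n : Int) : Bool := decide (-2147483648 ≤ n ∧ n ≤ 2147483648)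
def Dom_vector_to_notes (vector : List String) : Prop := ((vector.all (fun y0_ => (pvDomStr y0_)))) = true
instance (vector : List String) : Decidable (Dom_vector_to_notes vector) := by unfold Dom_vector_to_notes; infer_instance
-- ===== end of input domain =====

-- B: single forward pass (no reversals, no separate duration counter); return-value equivalence only — A mutates its argument (leaves vector reversed), B does not.
-- ===== PORT A =====
def vector_to_notes (vector : List String) : List (String × Int) :=
  -- duration = 1; notes = []; vector.reverse(); for num in vector: ...
  ((vector.reverse).foldl (fun (st : Int × List (String × Int)) num =>
      if num ≠ "1000" then (1, st.2 ++ [(num, st.1)])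
      else (st.1 + 1, st.2)) (1, [])).2.reverse

-- ===== PORT B =====
-- notes[-1][1] += 1 : increment the second component of the last element
def incLast (ns : List (String × Int)) : List (String × Int) :=
  match ns with
  | [] => []
  | [(s, v)] => [(s, v + 1)]
  | p :: rest => p :: incLast rest

def vector_to_notes_alt (vector : List String) : List (String × Int) :=
  vector.foldl (fun notes num =>
      if num ≠ "1000" then notes ++ [(num, 1)]
      else if notes = [] then notes
      else incLast notes) []

-- ===== PRECONDITION & SPEC =====
def Spec_vector_to_notes (vector : List String) (out : List (String × Int)) : Prop := out = vector_to_notes_alt vector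
instance (vector : List String) (out : List (String × Int)) : Decidable (Spec_vector_to_notes vector out) := by unfold Spec_vector_to_notes; infer_instance

-- ===== CLAIM (what is proved, stated in full; the proofs are below) =====
def Claim_equal_vector_to_notes : Prop := ∀ (vector : List String), Dom_vector_to_notes vector → Spec_vector_to_notes vector (vector_to_notes vector)

-- ===== LEMMAS AND PROOFS =====

-- ===== VERDICT (by name: the statement is the Claim_ definition above) =====
-- add k to the duration of the last note (identity on [])
def incLastBy (k : Int) (ns : List (String × Int)) : List (String × Int) :=
  match ns with
  | [] => []
  | [(s, v)] => [(s, v + k)]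
  | p :: rest => p :: incLastBy k rest

theorem incLastBy_cons (k : Int) (p : String × Int) (rest : List (String × Int)) (h : rest ≠ []) :
    incLastBy k (p :: rest) = p :: incLastBy k rest := by
  cases rest with
  | nil => exact absurd rfl h
  | cons q t => rfl

theorem incLastBy_ne_nil (k : Int) (ns : List (String × Int)) (h : ns ≠ []) :
    incLastBy k ns ≠ [] := by
  cases ns with
  | nil => exact absurd rfl h
  | cons p t =>
    cases t with
    | nil => obtain ⟨s, v⟩ := p; simp [incLastBy]
    | cons q u => simp [incLastBy]

theorem incLast_eq (ns : List (String × Int)) : incLast ns = incLastBy 1 ns := by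
  induction ns with
  | nil => rfl
  | cons p rest ih =>
    cases rest with
    | nil => obtain ⟨s, v⟩ := p; rfl
    | cons q t => simp [incLast, incLastBy, ih]

theorem incLastBy_zero (ns : List (String × Int)) : incLastBy 0 ns = ns := by
  induction ns with
  | nil => rfl
  | cons p rest ih =>
    cases rest with
    | nil => obtain ⟨s, v⟩ := p; simp [incLastBy]
    | cons q t => simp [incLastBy] at ih ⊢; exact ih

theorem incLastBy_incLastBy (a b : Int) (ns : List (String × Int)) :
    incLastBy a (incLastBy b ns) = incLastBy (a + b) ns := by
  induction ns with
  | nil => rfl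
  | cons p rest ih =>
    cases rest with
    | nil => obtain ⟨s, v⟩ := p; simp [incLastBy]; ring
    | cons q t =>
      rw [incLastBy_cons b p _ (by simp), incLastBy_cons (a + b) p _ (by simp),
        incLastBy_cons a p _ (incLastBy_ne_nil b _ (by simp)), ih]

theorem incLastBy_append (k : Int) (acc : List (String × Int)) (x : String) (c : Int) :
    incLastBy k (acc ++ [(x, c)]) = acc ++ [(x, c + k)] := by
  induction acc with
  | nil => rfl
  | cons p rest ih =>
    rw [List.cons_append, incLastBy_cons k p _ (by simp), ih, List.cons_append]

-- A's fold over the reversed vector, as a foldr over the vector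
def stepA (num : String) (st : Int × List (String × Int)) : Int × List (String × Int) :=
  if num ≠ "1000" then (1, st.2 ++ [(num, st.1)]) else (st.1 + 1, st.2)

def stepB (notes : List (String × Int)) (num : String) : List (String × Int) :=
  if num ≠ "1000" then notes ++ [(num, 1)]
  else if notes = [] then notes
  else incLast notes

theorem stepB_marker (acc : List (String × Int)) : stepB acc "1000" = incLastBy 1 acc := by
  cases acc with
  | nil => rfl
  | cons p t => simp [stepB, incLast_eq]

theorem key (xs : List String) (acc : List (String × Int)) :
    xs.foldl stepB acc =
      incLastBy ((xs.foldr stepA (1, [])).1 - 1) acc ++ ((xs.foldr stepA (1, [])).2).reverse := by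
  induction xs generalizing acc with
  | nil => simp [incLastBy_zero]
  | cons x rest ih =>
    by_cases hx : x = "1000"
    · subst hx
      simp only [List.foldl_cons, List.foldr_cons, stepB_marker]
      rw [ih, incLastBy_incLastBy]
      have h1 : stepA "1000" (List.foldr stepA (1, []) rest) =
          ((List.foldr stepA (1, []) rest).1 + 1, (List.foldr stepA (1, []) rest).2) := by
        simp [stepA]
      rw [h1]
      have h2 : (List.foldr stepA (1, []) rest).1 - 1 + 1 =
          (List.foldr stepA (1, []) rest).1 + 1 - 1 := by ring
      rw [h2]
    · simp only [List.foldl_cons, List.foldr_cons]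
      rw [show stepB acc x = acc ++ [(x, 1)] from by simp [stepB, hx]]
      rw [ih, incLastBy_append]
      have h1 : stepA x (List.foldr stepA (1, []) rest) =
          (1, (List.foldr stepA (1, []) rest).2 ++ [(x, (List.foldr stepA (1, []) rest).1)]) := by
        simp [stepA, hx]
      rw [h1]
      have h2 : (1 : Int) + ((List.foldr stepA (1, []) rest).1 - 1) =
          (List.foldr stepA (1, []) rest).1 := by ring
      simp only [h2]
      norm_num [incLastBy_zero]

theorem vector_to_notes_spec : Claim_equal_vector_to_notes := by
  intro vector _
  unfold Spec_vector_to_notes vector_to_notes vector_to_notes_alt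
  have hA : vector.reverse.foldl (fun (st : Int × List (String × Int)) num =>
      if num ≠ "1000" then (1, st.2 ++ [(num, st.1)]) else (st.1 + 1, st.2)) (1, []) =
      vector.foldr stepA (1, []) := by
    rw [List.foldl_reverse]; rfl
  have hB : vector.foldl (fun notes num =>
      if num ≠ "1000" then notes ++ [(num, 1)]
      else if notes = [] then notes
      else incLast notes) [] = vector.foldl stepB [] := rfl
  rw [hB, key, hA]
  cases h : (vector.foldr stepA (1, [])) with
  | mk d ns => simp [incLastBy]
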